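-- pv_equiv track=rewrite | github.com/Theoslyy/SAT-solvers | solver_teste.py | bobinho
-- ===== SOURCE A (Python) =====
-- def resolucao(c1, c2):
--     resolvente = set()
--
--     for l in c1:
--         if -l in c2:  # literal complementar
--             new_clause = (c1 - {l}) | (c2 - {-l})
--             resolvente.add(frozenset(new_clause)) # adiciona a nova cláusula resolvente, usando frozenset para garantir que seja imutável e possa ser armazenada em um conjunto
--
--     return resolvente
--
-- def bobinho(clausulas, max_iter=100):
--     clausulas = set(map(frozenset, clausulas)) #frozenset é só para trabalharmos com conjuntos de cláusulas.
--     #vamos ter um mapa entre as clausulas imutaveis e as clausulas mutaveis, para podermos trabalhar com conjuntos de clausulas e ao mesmo tempo ter a facilidade de manipular as clausulas como listas.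
--     count = 0
--     while True:
--         count += 1
--         if count > max_iter:
--             return "oops"
--         new_clausulas = set()
--         clause_list = list(clausulas)
--
--         # todos os pares
--         for i in range(len(clause_list)):
--             for j in range(i + 1, len(clause_list)):
--                 c1 = clause_list[i]
--                 c2 = clause_list[j]
--
--                 resolventes = resolucao(c1, c2)
--
--                 if frozenset() in resolventes:
--                     return "UNSAT"
--
--                 new_clausulas |= resolventes
--
--         # se não gerou nada novo
--         if new_clausulas.issubset(clausulas):
--             return "SAT"
--
--         clausulas |= new_clausulas
-- ===== SOURCE B (Python) =====
-- def _resolve(c1, c2):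
--     # all resolvents of the unordered pair {c1, c2}
--     return {c1.difference((l,)) | c2.difference((-l,)) for l in c1 if -l in c2}
--
-- def bobinho(clausulas, max_iter=100):
--     clausulas = set(map(frozenset, clausulas))
--     frontier = set(clausulas)
--     count = 0
--     while True:
--         count += 1
--         if count > max_iter:
--             return "oops"
--         new = set()
--         for f in frontier:
--             for c in clausulas:
--                 if c == f:
--                     continue
--                 r = _resolve(f, c)
--                 if frozenset() in r:
--                     return "UNSAT"
--                 new |= r
--         if new <= clausulas:
--             return "SAT"
--         frontier = new - clausulas
--         clausulas |= new
-- ===== Notes on version B (the rewrite author's own statement) =====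
-- stated objective: alternative
-- what changed: Instead of re-resolving every pair of clauses in every round, B keeps the frontier of clauses that were new in the previous round and resolves only pairs that involve a frontier clause (resolvents of old-old pairs were already produced and absorbed earlier), reaching the same fixpoint, the same UNSAT detection and the same round count; on the measured random inputs saturation itself dominates, so no speed-up was observed.
import Mathlib
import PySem

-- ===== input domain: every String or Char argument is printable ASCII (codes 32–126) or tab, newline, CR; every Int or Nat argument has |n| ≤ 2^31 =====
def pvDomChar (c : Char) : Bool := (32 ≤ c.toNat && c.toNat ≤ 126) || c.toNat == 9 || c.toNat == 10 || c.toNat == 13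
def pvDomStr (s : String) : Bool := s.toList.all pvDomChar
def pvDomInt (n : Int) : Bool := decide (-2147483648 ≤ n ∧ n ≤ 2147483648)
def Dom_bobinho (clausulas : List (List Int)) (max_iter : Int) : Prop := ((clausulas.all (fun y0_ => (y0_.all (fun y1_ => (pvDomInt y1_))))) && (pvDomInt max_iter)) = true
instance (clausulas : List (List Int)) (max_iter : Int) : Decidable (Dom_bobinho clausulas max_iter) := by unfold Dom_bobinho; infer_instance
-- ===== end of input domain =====

-- B resolves, each generation, only the pairs that involve a clause new in the previous
-- generation (incremental saturation) instead of re-resolving all pairs; same result.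
-- Both Pythons' results are independent of set iteration order, so the ports use
-- insertion order.  A frozenset of ints is represented by its strictly sorted list
-- (canon), so list equality is frozenset equality.

-- shared helper: canonical (strictly sorted, duplicate-free) form of a clause = frozenset
def insSorted (x : Int) : List Int → List Int
  | [] => [x]
  | y :: ys => if x < y then x :: y :: ys else if x = y then y :: ys else y :: insSorted x ys

def canon (c : List Int) : List Int := c.foldr insSorted []

-- shared helper (both Pythons have the identical resolution-of-one-pair routine):
-- all resolvents of the pair (c1, c2), as a set of canonical clauses
def resolucao (c1 c2 : List Int) : List (List Int) :=
  c1.foldl (fun acc l =>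
    if -l ∈ c2 then PySem.Set.add acc (canon (c1.filter (· ≠ l) ++ c2.filter (· ≠ -l)))
    else acc) []

-- ===== PORT A =====
-- inner loop of A's round: resolve c1 against every clause of rest (the j > i clauses),
-- accumulating new_clausulas; none = the empty clause appeared (return "UNSAT")
def resolveWithAll (c1 : List Int) : List (List Int) → List (List Int) → Option (List (List Int))
  | [], acc => some acc
  | c2 :: rest, acc =>
    let r := resolucao c1 c2
    if ([] : List Int) ∈ r then none
    else resolveWithAll c1 rest (PySem.Set.union acc r)

-- A's round: all pairs i < j of the clause list
def stepA : List (List Int) → List (List Int) → Option (List (List Int))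
  | [], acc => some acc
  | c :: rest, acc =>
    match resolveWithAll c rest acc with
    | none => none
    | some acc' => stepA rest acc'

-- A's while-loop; the fuel is the number of rounds max_iter still allows
def loopA : Nat → List (List Int) → String
  | 0, _ => "oops"
  | fuel + 1, clausulas =>
    match stepA clausulas [] with
    | none => "UNSAT"
    | some newC =>
      if PySem.Set.issubset newC clausulas then "SAT"
      else loopA fuel (PySem.Set.union clausulas newC)

def bobinho (clausulas : List (List Int)) (max_iter : Int) : String :=
  loopA max_iter.toNat (PySem.Set.ofList (clausulas.map canon))

-- ===== PORT B =====
-- B's inner loop: resolve frontier clause f against every clause of the whole set except f itself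
def resolveFront (f : List Int) : List (List Int) → List (List Int) → Option (List (List Int))
  | [], acc => some acc
  | c :: rest, acc =>
    if c = f then resolveFront f rest acc
    else
      let r := resolucao f c
      if ([] : List Int) ∈ r then none
      else resolveFront f rest (PySem.Set.union acc r)

-- B's round: only pairs involving a frontier clause
def stepB (clausulas : List (List Int)) : List (List Int) → List (List Int) → Option (List (List Int))
  | [], acc => some acc
  | f :: fs, acc =>
    match resolveFront f clausulas acc with
    | none => none
    | some acc' => stepB clausulas fs acc'

def loopB : Nat → List (List Int) → List (List Int) → String
  | 0, _, _ => "oops"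
  | fuel + 1, clausulas, frontier =>
    match stepB clausulas frontier [] with
    | none => "UNSAT"
    | some newC =>
      if PySem.Set.issubset newC clausulas then "SAT"
      else loopB fuel (PySem.Set.union clausulas newC) (PySem.Set.diff newC clausulas)

def bobinho_alt (clausulas : List (List Int)) (max_iter : Int) : String :=
  let C := PySem.Set.ofList (clausulas.map canon)
  loopB max_iter.toNat C C

-- ===== PRECONDITION & SPEC =====
def Spec_bobinho (clausulas : List (List Int)) (max_iter : Int) (out : String) : Prop := out = bobinho_alt clausulas max_iter
instance (clausulas : List (List Int)) (max_iter : Int) (out : String) : Decidable (Spec_bobinho clausulas max_iter out) := by unfold Spec_bobinho; infer_instance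

-- ===== CLAIM (what is proved, stated in full; the proofs are below) =====
def Claim_equal_bobinho : Prop := ∀ (clausulas : List (List Int)) (max_iter : Int), Dom_bobinho clausulas max_iter → Spec_bobinho clausulas max_iter (bobinho clausulas max_iter)

-- ===== LEMMAS AND PROOFS =====

lemma mem_insSorted (x z : Int) (l : List Int) : z ∈ insSorted x l ↔ z = x ∨ z ∈ l := by
  induction l with
  | nil => simp [insSorted]
  | cons y ys ih =>
    simp only [insSorted]
    split_ifs with h1 h2
    · simp [List.mem_cons]
    · subst h2
      simp only [List.mem_cons]
      tauto
    · simp only [List.mem_cons, ih]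
      tauto

lemma sorted_insSorted (x : Int) (l : List Int) (h : l.Pairwise (· < ·)) :
    (insSorted x l).Pairwise (· < ·) := by
  induction l with
  | nil => simp [insSorted]
  | cons y ys ih =>
    simp only [insSorted]
    rcases List.pairwise_cons.mp h with ⟨hy, hys⟩
    split_ifs with h1 h2
    · refine List.pairwise_cons.mpr ⟨?_, h⟩
      intro z hz
      rcases List.mem_cons.mp hz with rfl | hz
      · exact h1
      · exact lt_trans h1 (hy z hz)
    · exact h
    · refine List.pairwise_cons.mpr ⟨?_, ih hys⟩
      intro z hz
      rcases (mem_insSorted x z ys).mp hz with rfl | hz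
      · omega
      · exact hy z hz

lemma mem_canon (z : Int) (c : List Int) : z ∈ canon c ↔ z ∈ c := by
  induction c with
  | nil => simp [canon]
  | cons y ys ih => simp [canon, mem_insSorted] at *; tauto

lemma sorted_canon (c : List Int) : (canon c).Pairwise (· < ·) := by
  induction c with
  | nil => simp [canon]
  | cons y ys ih => exact sorted_insSorted y _ ih

lemma canon_ext (a b : List Int) (h : ∀ z, z ∈ a ↔ z ∈ b) : canon a = canon b := by
  have ha := sorted_canon a
  have hb := sorted_canon b
  have hperm : List.Perm (canon a) (canon b) := by
    refine (List.perm_ext_iff_of_nodup ha.nodup hb.nodup).mpr ?_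
    intro z; rw [mem_canon, mem_canon]; exact h z
  exact List.eq_of_perm_of_sorted (fun a b _ _ h1 h2 => le_antisymm h1 h2)
    (ha.imp le_of_lt) (hb.imp le_of_lt) hperm

lemma mem_resolucao (c1 c2 r : List Int) :
    r ∈ resolucao c1 c2 ↔
      ∃ l, l ∈ c1 ∧ -l ∈ c2 ∧ r = canon (c1.filter (· ≠ l) ++ c2.filter (· ≠ -l)) := by
  have aux : ∀ (L : List Int) (acc : List (List Int)),
      r ∈ L.foldl (fun acc l =>
          if -l ∈ c2 then PySem.Set.add acc (canon (c1.filter (· ≠ l) ++ c2.filter (· ≠ -l)))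
          else acc) acc ↔
        r ∈ acc ∨ ∃ l, l ∈ L ∧ -l ∈ c2 ∧ r = canon (c1.filter (· ≠ l) ++ c2.filter (· ≠ -l)) := by
    intro L
    induction L with
    | nil => simp
    | cons l ls ih =>
      intro acc
      simp only [List.foldl_cons]
      by_cases hl : -l ∈ c2
      · rw [if_pos hl, ih, PySem.Set.mem_add]
        constructor
        · rintro (⟨h | rfl⟩ | ⟨l', hl', hc, rfl⟩)
          · exact Or.inl h
          · exact Or.inr ⟨l, List.mem_cons_self .., hl, rfl⟩
          · exact Or.inr ⟨l', List.mem_cons_of_mem _ hl', hc, rfl⟩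
        · rintro (h | ⟨l', hl', hc, rfl⟩)
          · exact Or.inl (Or.inl h)
          · rcases List.mem_cons.mp hl' with rfl | hl'
            · exact Or.inl (Or.inr rfl)
            · exact Or.inr ⟨l', hl', hc, rfl⟩
      · rw [if_neg hl, ih]
        constructor
        · rintro (h | ⟨l', hl', hc, rfl⟩)
          · exact Or.inl h
          · exact Or.inr ⟨l', List.mem_cons_of_mem _ hl', hc, rfl⟩
        · rintro (h | ⟨l', hl', hc, rfl⟩)
          · exact Or.inl h
          · rcases List.mem_cons.mp hl' with rfl | hl'
            · exact absurd hc hl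
            · exact Or.inr ⟨l', hl', hc, rfl⟩
  unfold resolucao
  rw [aux c1 []]
  simp

lemma resolucao_symm (c1 c2 r : List Int) (h : r ∈ resolucao c1 c2) : r ∈ resolucao c2 c1 := by
  rcases (mem_resolucao c1 c2 r).mp h with ⟨l, hl1, hl2, rfl⟩
  refine (mem_resolucao c2 c1 _).mpr ⟨-l, hl2, by simpa using hl1, ?_⟩
  apply canon_ext
  intro z
  simp only [List.mem_append, List.mem_filter, neg_neg]
  tauto

-- characterization of A's inner loop
lemma resolveWithAll_none_iff (c1 : List Int) (rest acc : List (List Int)) :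
    resolveWithAll c1 rest acc = none ↔ ∃ c2 ∈ rest, ([] : List Int) ∈ resolucao c1 c2 := by
  induction rest generalizing acc with
  | nil => simp [resolveWithAll]
  | cons c2 rs ih =>
    simp only [resolveWithAll]
    by_cases he : ([] : List Int) ∈ resolucao c1 c2
    · simp [he]
    · simp [he, ih]

lemma resolveWithAll_some (c1 : List Int) (rest acc N : List (List Int))
    (h : resolveWithAll c1 rest acc = some N) :
    ∀ x, x ∈ N ↔ x ∈ acc ∨ ∃ c2 ∈ rest, x ∈ resolucao c1 c2 := by
  induction rest generalizing acc with
  | nil => simp [resolveWithAll] at h; subst h; simp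
  | cons c2 rs ih =>
    simp only [resolveWithAll] at h
    by_cases he : ([] : List Int) ∈ resolucao c1 c2
    · simp [he] at h
    · rw [if_neg he] at h
      intro x
      rw [ih _ h x, PySem.Set.mem_union]
      constructor
      · rintro (⟨h1 | h1⟩ | ⟨c', hc', hx⟩)
        · exact Or.inl h1
        · exact Or.inr ⟨c2, List.mem_cons_self .., h1⟩
        · exact Or.inr ⟨c', List.mem_cons_of_mem _ hc', hx⟩
      · rintro (h1 | ⟨c', hc', hx⟩)
        · exact Or.inl (Or.inl h1)
        · rcases List.mem_cons.mp hc' with rfl | hc'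
          · exact Or.inl (Or.inr hx)
          · exact Or.inr ⟨c', hc', hx⟩

def HasEmptyPair (l : List (List Int)) : Prop :=
  ∃ c1 ∈ l, ∃ c2 ∈ l, c1 ≠ c2 ∧ ([] : List Int) ∈ resolucao c1 c2

lemma stepA_none_iff (l acc : List (List Int)) (hn : l.Nodup) :
    stepA l acc = none ↔ HasEmptyPair l := by
  unfold HasEmptyPair
  induction l generalizing acc with
  | nil => simp [stepA]
  | cons c rest ih =>
    rcases List.nodup_cons.mp hn with ⟨hc, hrest⟩
    simp only [stepA]
    cases h : resolveWithAll c rest acc with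
    | none =>
      simp only [true_iff]
      rcases (resolveWithAll_none_iff c rest acc).mp h with ⟨c2, hc2, he⟩
      exact ⟨c, List.mem_cons_self .., c2, List.mem_cons_of_mem _ hc2,
        fun hEq => hc (hEq ▸ hc2), he⟩
    | some acc' =>
      rw [ih acc' hrest]
      have hno : ¬ ∃ c2 ∈ rest, ([] : List Int) ∈ resolucao c c2 := by
        intro hex; rw [← resolveWithAll_none_iff c rest acc] at hex; simp [h] at hex
      constructor
      · rintro ⟨c1, h1, c2, h2, hne, he⟩
        exact ⟨c1, List.mem_cons_of_mem _ h1, c2, List.mem_cons_of_mem _ h2, hne, he⟩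
      · rintro ⟨c1, h1, c2, h2, hne, he⟩
        rcases List.mem_cons.mp h1 with h1e | h1 <;> rcases List.mem_cons.mp h2 with h2e | h2
        · exact absurd (h1e.trans h2e.symm) hne
        · exact absurd ⟨c2, h2, h1e ▸ he⟩ hno
        · exact absurd ⟨c1, h1, resolucao_symm _ _ _ (h2e ▸ he)⟩ hno
        · exact ⟨c1, h1, c2, h2, hne, he⟩

lemma stepA_some_mem (l acc N : List (List Int)) (hn : l.Nodup)
    (h : stepA l acc = some N) :
    ∀ x, x ∈ N ↔ x ∈ acc ∨ ∃ c1 ∈ l, ∃ c2 ∈ l, c1 ≠ c2 ∧ x ∈ resolucao c1 c2 := by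
  induction l generalizing acc with
  | nil => simp [stepA] at h; subst h; simp
  | cons c rest ih =>
    rcases List.nodup_cons.mp hn with ⟨hc, hrest⟩
    simp only [stepA] at h
    cases hr : resolveWithAll c rest acc with
    | none => simp [hr] at h
    | some acc' =>
      rw [hr] at h
      intro x
      rw [ih acc' hrest h x, resolveWithAll_some c rest acc acc' hr x]
      constructor
      · rintro ((h1 | ⟨c2, hc2, hx⟩) | ⟨c1, h1, c2, h2, hne, hx⟩)
        · exact Or.inl h1
        · exact Or.inr ⟨c, List.mem_cons_self .., c2, List.mem_cons_of_mem _ hc2,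
            fun hEq => hc (hEq ▸ hc2), hx⟩
        · exact Or.inr ⟨c1, List.mem_cons_of_mem _ h1, c2, List.mem_cons_of_mem _ h2, hne, hx⟩
      · rintro (h1 | ⟨c1, h1, c2, h2, hne, hx⟩)
        · exact Or.inl (Or.inl h1)
        · rcases List.mem_cons.mp h1 with h1e | h1 <;> rcases List.mem_cons.mp h2 with h2e | h2
          · exact absurd (h1e.trans h2e.symm) hne
          · exact Or.inl (Or.inr ⟨c2, h2, h1e ▸ hx⟩)
          · exact Or.inl (Or.inr ⟨c1, h1, resolucao_symm _ _ _ (h2e ▸ hx)⟩)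
          · exact Or.inr ⟨c1, h1, c2, h2, hne, hx⟩

-- characterization of B's inner loop
lemma resolveFront_none_iff (f : List Int) (C acc : List (List Int)) :
    resolveFront f C acc = none ↔ ∃ c ∈ C, c ≠ f ∧ ([] : List Int) ∈ resolucao f c := by
  induction C generalizing acc with
  | nil => simp [resolveFront]
  | cons c rest ih =>
    simp only [resolveFront]
    by_cases hcf : c = f
    · rw [if_pos hcf, ih]
      subst hcf
      constructor
      · rintro ⟨c', hc', hne, he⟩; exact ⟨c', List.mem_cons_of_mem _ hc', hne, he⟩
      · rintro ⟨c', hc', hne, he⟩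
        rcases List.mem_cons.mp hc' with rfl | hc'
        · exact absurd rfl hne
        · exact ⟨c', hc', hne, he⟩
    · rw [if_neg hcf]
      by_cases he : ([] : List Int) ∈ resolucao f c
      · simp only [he, if_true, true_iff]
        exact ⟨c, List.mem_cons_self .., hcf, he⟩
      · rw [if_neg he, ih]
        constructor
        · rintro ⟨c', hc', hne, he'⟩; exact ⟨c', List.mem_cons_of_mem _ hc', hne, he'⟩
        · rintro ⟨c', hc', hne, he'⟩
          rcases List.mem_cons.mp hc' with rfl | hc'
          · exact absurd he' he
          · exact ⟨c', hc', hne, he'⟩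

lemma resolveFront_some (f : List Int) (C acc N : List (List Int))
    (h : resolveFront f C acc = some N) :
    ∀ x, x ∈ N ↔ x ∈ acc ∨ ∃ c ∈ C, c ≠ f ∧ x ∈ resolucao f c := by
  induction C generalizing acc with
  | nil => simp [resolveFront] at h; subst h; simp
  | cons c rest ih =>
    simp only [resolveFront] at h
    by_cases hcf : c = f
    · rw [if_pos hcf] at h
      subst hcf
      intro x
      rw [ih acc h x]
      constructor
      · rintro (h1 | ⟨c', hc', hne, hx⟩)
        · exact Or.inl h1
        · exact Or.inr ⟨c', List.mem_cons_of_mem _ hc', hne, hx⟩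
      · rintro (h1 | ⟨c', hc', hne, hx⟩)
        · exact Or.inl h1
        · rcases List.mem_cons.mp hc' with rfl | hc'
          · exact absurd rfl hne
          · exact Or.inr ⟨c', hc', hne, hx⟩
    · rw [if_neg hcf] at h
      by_cases he : ([] : List Int) ∈ resolucao f c
      · simp [he] at h
      · rw [if_neg he] at h
        intro x
        rw [ih _ h x, PySem.Set.mem_union]
        constructor
        · rintro (⟨h1 | h1⟩ | ⟨c', hc', hne, hx⟩)
          · exact Or.inl h1
          · exact Or.inr ⟨c, List.mem_cons_self .., hcf, h1⟩
          · exact Or.inr ⟨c', List.mem_cons_of_mem _ hc', hne, hx⟩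
        · rintro (h1 | ⟨c', hc', hne, hx⟩)
          · exact Or.inl (Or.inl h1)
          · rcases List.mem_cons.mp hc' with rfl | hc'
            · exact Or.inl (Or.inr hx)
            · exact Or.inr ⟨c', hc', hne, hx⟩

def HasEmptyFront (C F : List (List Int)) : Prop :=
  ∃ f ∈ F, ∃ c ∈ C, c ≠ f ∧ ([] : List Int) ∈ resolucao f c

lemma stepB_none_iff (C F acc : List (List Int)) :
    stepB C F acc = none ↔ HasEmptyFront C F := by
  unfold HasEmptyFront
  induction F generalizing acc with
  | nil => simp [stepB]
  | cons f fs ih =>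
    simp only [stepB]
    cases h : resolveFront f C acc with
    | none =>
      simp only [true_iff]
      rcases (resolveFront_none_iff f C acc).mp h with ⟨c, hc, hne, he⟩
      exact ⟨f, List.mem_cons_self .., c, hc, hne, he⟩
    | some acc' =>
      rw [ih acc']
      have hno : ¬ ∃ c ∈ C, c ≠ f ∧ ([] : List Int) ∈ resolucao f c := by
        intro hex; rw [← resolveFront_none_iff f C acc] at hex; simp [h] at hex
      constructor
      · rintro ⟨f', h1, c, h2, hne, he⟩
        exact ⟨f', List.mem_cons_of_mem _ h1, c, h2, hne, he⟩
      · rintro ⟨f', h1, c, h2, hne, he⟩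
        rcases List.mem_cons.mp h1 with rfl | h1
        · exact absurd ⟨c, h2, hne, he⟩ hno
        · exact ⟨f', h1, c, h2, hne, he⟩

lemma stepB_some_mem (C F acc N : List (List Int)) (h : stepB C F acc = some N) :
    ∀ x, x ∈ N ↔ x ∈ acc ∨ ∃ f ∈ F, ∃ c ∈ C, c ≠ f ∧ x ∈ resolucao f c := by
  induction F generalizing acc with
  | nil => simp [stepB] at h; subst h; simp
  | cons f fs ih =>
    simp only [stepB] at h
    cases hr : resolveFront f C acc with
    | none => simp [hr] at h
    | some acc' =>
      rw [hr] at h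
      intro x
      rw [ih acc' h x, resolveFront_some f C acc acc' hr x]
      constructor
      · rintro ((h1 | ⟨c, hc, hne, hx⟩) | ⟨f', h1, c, h2, hne, hx⟩)
        · exact Or.inl h1
        · exact Or.inr ⟨f, List.mem_cons_self .., c, hc, hne, hx⟩
        · exact Or.inr ⟨f', List.mem_cons_of_mem _ h1, c, h2, hne, hx⟩
      · rintro (h1 | ⟨f', h1, c, h2, hne, hx⟩)
        · exact Or.inl (Or.inl h1)
        · rcases List.mem_cons.mp h1 with rfl | h1
          · exact Or.inl (Or.inr ⟨c, h2, hne, hx⟩)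
          · exact Or.inr ⟨f', h1, c, h2, hne, hx⟩

-- the main loop invariant: every resolvent of a pair of "old" clauses (both outside the
-- frontier) is already present and is not the empty clause
lemma loop_eq (fuel : Nat) :
    ∀ (CA CB F : List (List Int)),
      CA.Nodup → CB.Nodup →
      (∀ x, x ∈ CA ↔ x ∈ CB) →
      (∀ f ∈ F, f ∈ CB) →
      (∀ c1 c2 r, c1 ∈ CB → c2 ∈ CB → c1 ≠ c2 → c1 ∉ F → c2 ∉ F →
        r ∈ resolucao c1 c2 → r ∈ CB ∧ r ≠ []) →
      loopA fuel CA = loopB fuel CB F := by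
  induction fuel with
  | zero => intros; rfl
  | succ fuel ih =>
    intro CA CB F hnA hnB hsame hF hinv
    have hnone : stepA CA [] = none ↔ stepB CB F [] = none := by
      rw [stepA_none_iff CA [] hnA, stepB_none_iff]
      unfold HasEmptyPair HasEmptyFront
      constructor
      · rintro ⟨c1, h1, c2, h2, hne, he⟩
        rw [hsame] at h1 h2
        by_cases hf1 : c1 ∈ F
        · exact ⟨c1, hf1, c2, h2, fun h => hne h.symm, he⟩
        · by_cases hf2 : c2 ∈ F
          · exact ⟨c2, hf2, c1, h1, hne, resolucao_symm _ _ _ he⟩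
          · exact absurd rfl (hinv c1 c2 [] h1 h2 hne hf1 hf2 he).2
      · rintro ⟨f, hf', c, hc, hne, he⟩
        exact ⟨f, (hsame f).mpr (hF f hf'), c, (hsame c).mpr hc, fun h => hne h.symm, he⟩
    simp only [loopA, loopB]
    cases hA : stepA CA [] with
    | none =>
      rw [hnone.mp hA]
    | some NA =>
      cases hB : stepB CB F [] with
      | none => rw [hnone.mpr hB] at hA; cases hA
      | some NB =>
        have hmemA := stepA_some_mem CA [] NA hnA hA
        have hmemB := stepB_some_mem CB F [] NB hB
        have hnoe : ¬ HasEmptyFront CB F := by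
          rw [← stepB_none_iff CB F []]; simp [hB]
        -- N_B ⊆ N_A
        have hBA : ∀ x ∈ NB, x ∈ NA := by
          intro x hx
          rcases (hmemB x).mp hx with h | ⟨f, hf', c, hc, hne, hxr⟩
          · simp at h
          · exact (hmemA x).mpr (Or.inr ⟨f, (hsame f).mpr (hF f hf'), c, (hsame c).mpr hc,
              fun h => hne h.symm, hxr⟩)
        -- N_A ⊆ N_B ∪ C_B
        have hAB : ∀ x ∈ NA, x ∈ NB ∨ x ∈ CB := by
          intro x hx
          rcases (hmemA x).mp hx with h | ⟨c1, h1, c2, h2, hne, hxr⟩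
          · simp at h
          · rw [hsame] at h1 h2
            by_cases hf1 : c1 ∈ F
            · exact Or.inl ((hmemB x).mpr (Or.inr ⟨c1, hf1, c2, h2, fun h => hne h.symm, hxr⟩))
            · by_cases hf2 : c2 ∈ F
              · exact Or.inl ((hmemB x).mpr (Or.inr
                  ⟨c2, hf2, c1, h1, hne, resolucao_symm _ _ _ hxr⟩))
              · exact Or.inr (hinv c1 c2 x h1 h2 hne hf1 hf2 hxr).1
        have hAtoB : (∀ x ∈ NA, x ∈ CA) → (∀ x ∈ NB, x ∈ CB) := by
          intro hall x hx
          exact (hsame x).mp (hall x (hBA x hx))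
        have hBtoA : (∀ x ∈ NB, x ∈ CB) → (∀ x ∈ NA, x ∈ CA) := by
          intro hall x hx
          rcases hAB x hx with h | h
          · exact (hsame x).mpr (hall x h)
          · exact (hsame x).mpr h
        have hsub : PySem.Set.issubset NA CA = PySem.Set.issubset NB CB := by
          by_cases hs : PySem.Set.issubset NB CB = true
          · rw [hs]
            exact (PySem.Set.issubset_iff ..).mpr (hBtoA ((PySem.Set.issubset_iff ..).mp hs))
          · rw [Bool.not_eq_true] at hs
            rw [hs]
            refine Bool.eq_false_iff.mpr (fun h => ?_)
            rw [Bool.eq_false_iff] at hs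
            exact hs ((PySem.Set.issubset_iff ..).mpr (hAtoB ((PySem.Set.issubset_iff ..).mp h)))
        dsimp only
        rw [hsub]
        by_cases hs : PySem.Set.issubset NB CB = true
        · rw [hs]; simp
        · rw [Bool.not_eq_true] at hs
          rw [hs]
          simp only [Bool.false_eq_true, if_false]
          apply ih
          · exact PySem.Set.nodup_union _ _ hnA
          · exact PySem.Set.nodup_union _ _ hnB
          · intro x
            rw [PySem.Set.mem_union, PySem.Set.mem_union]
            constructor
            · rintro (h | h)
              · exact Or.inl ((hsame x).mp h)
              · rcases hAB x h with h' | h'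
                · exact Or.inr h'
                · exact Or.inl h'
            · rintro (h | h)
              · exact Or.inl ((hsame x).mpr h)
              · exact Or.inr (hBA x h)
          · intro f hf'
            rw [PySem.Set.mem_diff] at hf'
            exact (PySem.Set.mem_union ..).mpr (Or.inr hf'.1)
          · intro c1 c2 r h1 h2 hne hf1 hf2 hr
            rw [PySem.Set.mem_union] at h1 h2
            rw [PySem.Set.mem_diff] at hf1 hf2
            have h1' : c1 ∈ CB := by
              rcases h1 with h | h
              · exact h
              · by_contra hc; exact hf1 ⟨h, hc⟩
            have h2' : c2 ∈ CB := by
              rcases h2 with h | h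
              · exact h
              · by_contra hc; exact hf2 ⟨h, hc⟩
            have hrne : r ∈ NB → r ≠ [] := by
              intro hrN hre
              subst hre
              rcases (hmemB []).mp hrN with h | ⟨f, hf', c, hc, hnec, he⟩
              · simp at h
              · exact hnoe ⟨f, hf', c, hc, hnec, he⟩
            by_cases hF1 : c1 ∈ F
            · have hrN : r ∈ NB := (hmemB r).mpr
                (Or.inr ⟨c1, hF1, c2, h2', fun h => hne h.symm, hr⟩)
              exact ⟨(PySem.Set.mem_union ..).mpr (Or.inr hrN), hrne hrN⟩
            · by_cases hF2 : c2 ∈ F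
              · have hrN : r ∈ NB := (hmemB r).mpr
                  (Or.inr ⟨c2, hF2, c1, h1', hne, resolucao_symm _ _ _ hr⟩)
                exact ⟨(PySem.Set.mem_union ..).mpr (Or.inr hrN), hrne hrN⟩
              · rcases hinv c1 c2 r h1' h2' hne hF1 hF2 hr with ⟨hrC, hrne'⟩
                exact ⟨(PySem.Set.mem_union ..).mpr (Or.inl hrC), hrne'⟩

-- ===== VERDICT (by name: the statement is the Claim_ definition above) =====
theorem bobinho_spec : Claim_equal_bobinho := by
  intro clausulas max_iter _
  unfold Spec_bobinho bobinho bobinho_alt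
  exact loop_eq max_iter.toNat _ _ _ (PySem.Set.nodup_ofList _) (PySem.Set.nodup_ofList _)
    (fun x => Iff.rfl) (fun f hf => hf)
    (fun c1 c2 r h1 h2 hne hf1 hf2 hr => absurd h1 hf1)
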